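-- pv_equiv track=rewrite | github.com/amitalable/LeetCode-July-2021 | July-2021/Week 4/PartitionDisjoint.py | partitionDisjoint
-- ===== SOURCE A (Python) =====
-- from typing import List
--
-- def partitionDisjoint(nums: List[int]) -> int:
--     leftMax = globalMax = nums[0]
--     partition = 0
--     for i in range(1, len(nums)):
--         globalMax = max(globalMax, nums[i])
--         if nums[i] < leftMax:
--             # If nums[i] < leftMax
--             # then nums[i] belong to left subarray,
--             # re-partition leftSubArr = nums[0..i]
--             partition = i
--             leftMax = globalMax
--     return partition + 1
-- ===== SOURCE B (Python) =====
-- from typing import List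
--
-- def partitionDisjoint(nums: List[int]) -> int:
--     n = len(nums)
--     suffMin = [0] * n
--     suffMin[n - 1] = nums[n - 1]
--     for i in range(n - 2, -1, -1):
--         suffMin[i] = min(nums[i], suffMin[i + 1])
--     prefMax = nums[0]
--     for i in range(1, n):
--         if prefMax <= suffMin[i]:
--             return i
--         prefMax = max(prefMax, nums[i])
--     return n
-- ===== Notes on version B (the rewrite author's own statement) =====
-- stated objective: alternative
-- what changed: Replaces A's single-pass repartitioning (tracking leftMax/globalMax and moving the partition on each smaller element) by a suffix-minimum table built right-to-left plus a left-to-right prefix-max sweep that returns the first index where prefixMax <= suffixMin.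
import Mathlib
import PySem

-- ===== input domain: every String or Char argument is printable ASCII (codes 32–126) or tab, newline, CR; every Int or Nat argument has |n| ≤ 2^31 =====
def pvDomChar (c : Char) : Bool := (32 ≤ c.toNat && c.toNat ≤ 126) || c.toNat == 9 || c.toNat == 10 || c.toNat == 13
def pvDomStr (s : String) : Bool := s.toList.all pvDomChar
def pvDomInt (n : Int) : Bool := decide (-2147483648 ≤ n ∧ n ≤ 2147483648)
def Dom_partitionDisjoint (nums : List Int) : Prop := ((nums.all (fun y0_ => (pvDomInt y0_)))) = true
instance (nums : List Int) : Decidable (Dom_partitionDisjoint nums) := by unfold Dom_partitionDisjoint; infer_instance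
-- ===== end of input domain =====

-- B computes the split via a suffix-minimum table and a prefix-max sweep instead of A's
-- single-pass repartitioning; equal return values proved on all nonempty lists (both raise on []).

-- ===== PORT A =====
def partitionDisjoint (nums : List Int) : Int :=
  match PySem.List.pyGet? nums 0 with
  | none => 0  -- nums[0] raises IndexError on []; excluded by Pre_
  | some x0 =>
    -- for i in range(1, len(nums)): i is always in range, so pyGetD is exact for nums[i]
    let st := (PySem.List.pyRange 1 (nums.length : Int) 1).foldl
      (fun (s : Int × Int × Int) i =>
        let v := PySem.List.pyGetD nums i 0
        let gm := max s.2.1 v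
        if v < s.1 then (gm, gm, i) else (s.1, gm, s.2.2))
      (x0, x0, 0)
    st.2.2 + 1

-- ===== PORT B =====
-- the right-to-left fill of suffMin: buildSuffMin nums = [min(nums[i:]) for each i]
def buildSuffMin : List Int → List Int
  | [] => []
  | v :: t =>
    match buildSuffMin t with
    | [] => [v]
    | m :: ms => min v m :: m :: ms

-- the left-to-right scan: walks nums[i:] and suffMin[i:] in step, returning the first i
-- with prefMax <= suffMin[i], or n if none
def findSplit : Int → Int → List Int → List Int → Int
  | _, i, [], _ => i
  | _, i, _, [] => i
  | pm, i, v :: vt, sm :: smt => if pm ≤ sm then i else findSplit (max pm v) (i + 1) vt smt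

def partitionDisjoint_alt (nums : List Int) : Int :=
  match nums with
  | [] => 0  -- suffMin[n-1] = nums[n-1] raises IndexError on []; excluded by Pre_
  | x :: rest => findSplit x 1 rest (buildSuffMin nums).tail

-- ===== PRECONDITION & SPEC =====
-- Pre_ excludes exactly the empty list, on which both Pythons raise IndexError.
def Pre_partitionDisjoint (nums : List Int) : Prop := nums ≠ []
instance (nums : List Int) : Decidable (Pre_partitionDisjoint nums) := by
  unfold Pre_partitionDisjoint; infer_instance
def pvWitness_partitionDisjoint : List Int := [1]

def Spec_partitionDisjoint (nums : List Int) (out : Int) : Prop := out = partitionDisjoint_alt nums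
instance (nums : List Int) (out : Int) : Decidable (Spec_partitionDisjoint nums out) := by unfold Spec_partitionDisjoint; infer_instance

-- ===== CLAIM (what is proved, stated in full; the proofs are below) =====
def Claim_equal_partitionDisjoint : Prop := ∀ (nums : List Int), Dom_partitionDisjoint nums → Pre_partitionDisjoint nums → Spec_partitionDisjoint nums (partitionDisjoint nums)

-- ===== LEMMAS AND PROOFS =====

-- proof-side companion: first split index together with the prefix max at that point
def FS2 : Int → Int → List Int → Int × Int
  | pm, i, [] => (i, pm)
  | pm, i, v :: t =>
    if (v :: t).all (fun y => decide (pm ≤ y)) then (i, pm) else FS2 (max pm v) (i + 1) t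

lemma le_foldl_min (l : List Int) : ∀ (pm a : Int),
    pm ≤ l.foldl min a ↔ pm ≤ a ∧ ∀ y ∈ l, pm ≤ y := by
  induction l with
  | nil => simp
  | cons w t ih =>
    intro pm a
    simp only [List.foldl_cons, ih, le_min_iff, List.mem_cons]
    constructor
    · rintro ⟨⟨h1, h2⟩, h3⟩
      exact ⟨h1, fun y hy => by rcases hy with rfl | hy; exact h2; exact h3 y hy⟩
    · rintro ⟨h1, h2⟩
      exact ⟨⟨h1, h2 w (Or.inl rfl)⟩, fun y hy => h2 y (Or.inr hy)⟩

lemma foldl_min_min (l : List Int) : ∀ (a b : Int),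
    l.foldl min (min a b) = min a (l.foldl min b) := by
  induction l with
  | nil => intro a b; rfl
  | cons c t ih =>
    intro a b
    simp only [List.foldl_cons, min_assoc, ih]

lemma buildSuffMin_cons : ∀ (t : List Int) (v : Int),
    buildSuffMin (v :: t) = t.foldl min v :: buildSuffMin t := by
  intro t
  induction t with
  | nil => intro v; simp [buildSuffMin]
  | cons w t' ih =>
    intro v
    show (match buildSuffMin (w :: t') with
          | [] => [v]
          | m :: ms => min v m :: m :: ms) = _
    rw [ih w]
    simp only [List.foldl_cons]
    rw [foldl_min_min]

lemma findSplit_eq_FS2 : ∀ (l : List Int) (pm i : Int),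
    findSplit pm i l (buildSuffMin l) = (FS2 pm i l).1 := by
  intro l
  induction l with
  | nil => intro pm i; rfl
  | cons v t ih =>
    intro pm i
    rw [buildSuffMin_cons]
    show (if pm ≤ t.foldl min v then i else findSplit (max pm v) (i + 1) t (buildSuffMin t)) = _
    have hiff : (pm ≤ t.foldl min v) ↔ ((v :: t).all (fun y => decide (pm ≤ y)) = true) := by
      rw [le_foldl_min]
      simp [List.all_eq_true]
    by_cases h : pm ≤ t.foldl min v
    · rw [if_pos h]
      simp only [FS2, if_pos (hiff.mp h)]
    · rw [if_neg h]
      simp only [FS2, if_neg (fun hc => h (hiff.mpr hc))]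
      exact ih (max pm v) (i + 1)

lemma FS2_pm_le : ∀ (t : List Int) (pm i : Int), pm ≤ (FS2 pm i t).2 := by
  intro t
  induction t with
  | nil => intro pm i; exact le_refl _
  | cons v t' ih =>
    intro pm i
    simp only [FS2]
    split
    · exact le_refl _
    · exact le_trans (le_max_left pm v) (ih (max pm v) (i + 1))

lemma le_foldl_max_self : ∀ (l : List Int) (a : Int), a ≤ l.foldl max a := by
  intro l
  induction l with
  | nil => intro a; exact le_refl _
  | cons v t ih => intro a; exact le_trans (le_max_left a v) (ih (max a v))

lemma FS2_snd_le : ∀ (t : List Int) (pm i : Int), (FS2 pm i t).2 ≤ t.foldl max pm := by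
  intro t
  induction t with
  | nil => intro pm i; exact le_refl _
  | cons v t' ih =>
    intro pm i
    simp only [FS2, List.foldl_cons]
    split
    · exact le_trans (le_max_left pm v) (le_foldl_max_self t' (max pm v))
    · exact ih (max pm v) (i + 1)

lemma FS2_append : ∀ (t : List Int) (pm i v : Int),
    FS2 pm i (t ++ [v]) =
      if v < (FS2 pm i t).2 then (i + (t.length : Int) + 1, t.foldl max pm)
      else FS2 pm i t := by
  intro t
  induction t with
  | nil =>
    intro pm i v
    by_cases h : v < pm
    · have hle : ¬ pm ≤ v := not_le.mpr h
      simp [FS2, hle, max_eq_left (le_of_lt h), h]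
    · have hle : pm ≤ v := not_lt.mp h
      simp [FS2, hle, h]
  | cons w t' ih =>
    intro pm i v
    by_cases hC : (w :: t').all (fun y => decide (pm ≤ y)) = true
    · have hM : (FS2 pm i (w :: t')).2 = pm := by simp only [FS2, if_pos hC]
      by_cases hv : v < pm
      · -- new element breaks the split: all fails on the appended list
        have hC' : ¬ ((w :: (t' ++ [v])).all (fun y => decide (pm ≤ y)) = true) := by
          simp only [List.all_eq_true] at *
          intro hall
          exact absurd (of_decide_eq_true (hall v (by simp))) (not_le.mpr hv)
        have hv' : v < (FS2 (max pm w) (i + 1) t').2 :=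
          lt_of_lt_of_le hv (le_trans (le_max_left pm w) (FS2_pm_le t' (max pm w) (i + 1)))
        rw [hM, if_pos hv]
        show FS2 pm i (w :: (t' ++ [v])) = _
        simp only [FS2, if_neg hC']
        rw [ih (max pm w) (i + 1) v, if_pos hv']
        simp only [List.length_cons, List.foldl_cons]
        congr 1
        push_cast
        ring
      · have hC' : (w :: (t' ++ [v])).all (fun y => decide (pm ≤ y)) = true := by
          simp only [List.all_eq_true] at *
          intro y hy
          simp at hy
          rcases hy with rfl | hy | rfl
          · exact hC y (by simp)
          · exact hC y (by simp [hy])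
          · exact decide_eq_true (not_lt.mp hv)
        rw [hM, if_neg hv]
        show FS2 pm i (w :: (t' ++ [v])) = _
        simp only [FS2, if_pos hC', if_pos hC]
    · have hC' : ¬ ((w :: (t' ++ [v])).all (fun y => decide (pm ≤ y)) = true) := by
        simp only [List.all_eq_true] at *
        intro hall
        exact hC (fun y hy => hall y (by
          simp only [List.mem_cons, List.mem_append] at *
          rcases hy with rfl | hy
          · exact Or.inl rfl
          · exact Or.inr (Or.inl hy)))
      have hM : (FS2 pm i (w :: t')).2 = (FS2 (max pm w) (i + 1) t').2 := by
        simp only [FS2, if_neg hC]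
      show FS2 pm i (w :: (t' ++ [v])) = _
      simp only [FS2, if_neg hC', if_neg hC]
      rw [ih (max pm w) (i + 1) v]
      by_cases hv : v < (FS2 (max pm w) (i + 1) t').2
      · rw [if_pos hv, if_pos hv]
        simp only [List.length_cons, List.foldl_cons]
        congr 1
        push_cast
        ring
      · rw [if_neg hv, if_neg hv]

-- A's loop body, on (index, value) pairs
def stepA (s : Int × Int × Int) (p : Int × Int) : Int × Int × Int :=
  let gm := max s.2.1 p.2
  if p.2 < s.1 then (gm, gm, p.1) else (s.1, gm, s.2.2)

-- bridge: A's fold over range(1, n) with nums[i] is the fold over enumerate(nums[1:], 1)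
lemma foldA_bridge {α : Type} (nums : List Int) (f : α → Int → Int → α) :
    ∀ (l : List Int) (i : ℕ) (init : α), nums.drop i = l →
      (PySem.List.pyRange (i : Int) (nums.length : Int) 1).foldl
          (fun acc j => f acc j (PySem.List.pyGetD nums j 0)) init
        = (PySem.List.enumerate l (i : Int)).foldl (fun acc p => f acc p.1 p.2) init := by
  intro l
  induction l with
  | nil =>
    intro i init h
    have hlen : nums.length ≤ i := by
      have := List.drop_eq_nil_iff.mp h
      omega
    rw [PySem.List.pyRange_one_eq_nil (by exact_mod_cast hlen)]
    simp [PySem.List.enumerate]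
  | cons y t ih =>
    intro i init h
    have hi : i < nums.length := by
      by_contra hge
      rw [List.drop_eq_nil_of_le (by omega)] at h
      simp at h
    have hy : nums[i]? = some y := by
      have h2 := congrArg (fun l => l[0]?) h
      simpa using h2
    have hget : PySem.List.pyGetD nums (i : Int) 0 = y := by
      rw [PySem.List.pyGetD_natCast]
      simp [List.getD, hy]
    have hdrop : nums.drop (i + 1) = t := by
      have : nums.drop (i + 1) = (nums.drop i).drop 1 := by
        rw [List.drop_drop]
      rw [this, h]
      rfl
    rw [PySem.List.pyRange_one_cons (by exact_mod_cast hi)]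
    simp only [List.foldl_cons, PySem.List.enumerate, hget]
    have := ih (i + 1) (f init (i : Int) y) hdrop
    push_cast at this ⊢
    exact this

-- main invariant: A's fold state is (pm at split, running max, split index − 1)
lemma invA : ∀ (rest : List Int) (x : Int),
    (PySem.List.enumerate rest 1).foldl stepA (x, x, 0) =
      ((FS2 x 1 rest).2, rest.foldl max x, (FS2 x 1 rest).1 - 1) := by
  intro rest
  induction rest using List.reverseRecOn with
  | nil => intro x; simp [PySem.List.enumerate, FS2]
  | append_singleton t v ih =>
    intro x
    rw [PySem.List.enumerate_append, List.foldl_append, ih x]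
    simp only [PySem.List.enumerate, List.foldl_cons, List.foldl_nil]
    rw [FS2_append t x 1 v]
    by_cases hv : v < (FS2 x 1 t).2
    · have hle : v ≤ t.foldl max x := le_of_lt (lt_of_lt_of_le hv (FS2_snd_le t x 1))
      rw [if_pos hv]
      simp only [stepA, if_pos hv, List.foldl_append, List.foldl_cons, List.foldl_nil]
      rw [max_eq_left hle]
      simp only [Prod.mk.injEq]
      exact ⟨trivial, trivial, by ring⟩
    · rw [if_neg hv]
      simp only [stepA, if_neg hv, List.foldl_append, List.foldl_cons, List.foldl_nil]

-- ===== VERDICT (by name: the statement is the Claim_ definition above) =====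
theorem partitionDisjoint_spec : Claim_equal_partitionDisjoint := by
  intro nums _ hpre
  unfold Spec_partitionDisjoint
  obtain ⟨x, rest, rfl⟩ : ∃ x rest, nums = x :: rest := by
    cases nums with
    | nil => exact absurd rfl hpre
    | cons a l => exact ⟨a, l, rfl⟩
  have h0 : PySem.List.pyGet? (x :: rest) 0 = some x := by
    simp [PySem.List.pyGet?, PySem.List.pyIdx?]
  have hb := foldA_bridge (x :: rest)
    (fun (s : Int × Int × Int) (j v : Int) =>
      let gm := max s.2.1 v
      if v < s.1 then (gm, gm, j) else (s.1, gm, s.2.2))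
    rest 1 (x, x, 0) rfl
  simp only [Nat.cast_one] at hb
  simp only [partitionDisjoint, h0]
  rw [hb]
  have hstep : (PySem.List.enumerate rest 1).foldl
      (fun (acc : Int × Int × Int) (p : Int × Int) =>
        if p.2 < acc.1 then (max acc.2.1 p.2, max acc.2.1 p.2, p.1)
        else (acc.1, max acc.2.1 p.2, acc.2.2)) (x, x, 0)
      = (PySem.List.enumerate rest 1).foldl stepA (x, x, 0) := rfl
  rw [hstep, invA rest x]
  simp only [partitionDisjoint_alt, buildSuffMin_cons, List.tail_cons, findSplit_eq_FS2]
  ring
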